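-- pv_equiv track=rewrite | github.com/Swar028363/hasse_diagram_generator | main.py | gcd_prime_relation
-- ===== SOURCE A (Python) =====
-- import math
--
-- def gcd_prime_relation(x: int, y: int) -> bool:
--         # only connect upward
--         if x >= y:
--             return False
--         d = math.gcd(x, y)
--         # must share a prime gcd
--         if d <= 1:
--             return False
--         # check primality of gcd
--         def is_prime(n: int) -> bool:
--             if n < 2 or (n % 2 == 0 and n != 2):
--                 return False
--             p = 3
--             while p*p <= n:
--                 if n % p == 0:
--                     return False
--                 p += 2
--             return True
--         return is_prime(d)
-- ===== SOURCE B (Python) =====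
-- import math
--
-- def gcd_prime_relation(x: int, y: int) -> bool:
--     # only connect upward
--     if x >= y:
--         return False
--     d = math.gcd(x, y)
--     # must share a prime gcd
--     if d <= 1:
--         return False
--     # d >= 2: prime iff no k in [2, d) divides d (full-range trial division)
--     return all(d % k for k in range(2, d))
-- ===== Notes on version B (the rewrite author's own statement) =====
-- stated objective: simpler
-- what changed: Replaced the nested is_prime helper (even special-case plus odd trial division bounded by sqrt(d)) with a single all() over full-range trial division 2..d-1.
import Mathlib
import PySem

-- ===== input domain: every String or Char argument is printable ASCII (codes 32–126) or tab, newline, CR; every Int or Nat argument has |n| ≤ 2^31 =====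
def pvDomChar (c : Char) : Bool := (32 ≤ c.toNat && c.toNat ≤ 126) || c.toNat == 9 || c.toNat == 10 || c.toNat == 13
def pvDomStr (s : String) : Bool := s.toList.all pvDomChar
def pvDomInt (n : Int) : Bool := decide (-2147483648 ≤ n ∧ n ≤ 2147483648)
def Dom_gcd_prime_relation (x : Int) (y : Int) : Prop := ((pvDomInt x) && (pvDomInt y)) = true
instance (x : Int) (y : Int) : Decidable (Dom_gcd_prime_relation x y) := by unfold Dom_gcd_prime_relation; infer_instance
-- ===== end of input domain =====

-- B replaces A's nested is_prime helper (even special-case + odd trial division up to √d)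
-- with a single all() over full-range trial division 2..d-1; the two outer guards are unchanged.

-- ===== PORT A =====
-- the while loop of is_prime: while p*p <= n: if n % p == 0: return False; p += 2
-- fuel n.toNat+1 is enough: the loop runs only while p*p ≤ n, so at most n iterations from p = 3
def pvLoopA : Nat → Int → Int → Bool
  | 0, _, _ => true
  | fuel+1, n, p =>
      if p * p ≤ n then
        (if PySem.Int.mod n p = 0 then false else pvLoopA fuel n (p + 2))
      else true

-- nested helper is_prime of A
def pvIsPrimeA (n : Int) : Bool :=
  if n < 2 ∨ (PySem.Int.mod n 2 = 0 ∧ n ≠ 2) then false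
  else pvLoopA (n.toNat + 1) n 3

-- math.gcd(x, y) is the nonnegative gcd of |x| and |y|, which is exactly (Int.gcd x y : Int)
def gcd_prime_relation (x : Int) (y : Int) : Bool :=
  if x ≥ y then false
  else if (Int.gcd x y : Int) ≤ 1 then false
  else pvIsPrimeA (Int.gcd x y : Int)

-- ===== PORT B =====
def gcd_prime_relation_alt (x : Int) (y : Int) : Bool :=
  if x ≥ y then false
  else if (Int.gcd x y : Int) ≤ 1 then false
  else (PySem.List.pyRange 2 (Int.gcd x y : Int) 1).all
         (fun k => PySem.Int.mod (Int.gcd x y : Int) k != 0)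

-- ===== PRECONDITION & SPEC =====
def Spec_gcd_prime_relation (x : Int) (y : Int) (out : Bool) : Prop := out = gcd_prime_relation_alt x y
instance (x : Int) (y : Int) (out : Bool) : Decidable (Spec_gcd_prime_relation x y out) := by unfold Spec_gcd_prime_relation; infer_instance

-- ===== CLAIM (what is proved, stated in full; the proofs are below) =====
def Claim_equal_gcd_prime_relation : Prop := ∀ (x : Int) (y : Int), Dom_gcd_prime_relation x y → Spec_gcd_prime_relation x y (gcd_prime_relation x y)

-- ===== LEMMAS AND PROOFS =====

-- "no divisor q with 2 ≤ q < p divides d"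
def pvNoDiv (d p : Int) : Prop := ∀ q : Int, 2 ≤ q → q < p → ¬ q ∣ d

-- a composite d ≥ 2 has a divisor m with m*m ≤ d
lemma pv_small_div (d : Int) (hd : 2 ≤ d) (h : ¬ pvNoDiv d d) :
    ∃ m : Int, 2 ≤ m ∧ m * m ≤ d ∧ m ∣ d := by
  unfold pvNoDiv at h
  push_neg at h
  obtain ⟨q, hq2, hqd, hqdvd⟩ := h
  have hd0 : (d.toNat : Int) = d := Int.toNat_of_nonneg (by omega)
  have hnp : ¬ Nat.Prime d.toNat := by
    intro hp
    have hq0 : (0:Int) ≤ q := by omega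
    have hcast : ((q.toNat : Int)) ∣ ((d.toNat : Int)) := by
      rw [Int.toNat_of_nonneg hq0, hd0]; exact hqdvd
    have := (Nat.prime_def_lt.mp hp).2 q.toNat (by omega) (Int.natCast_dvd_natCast.mp hcast)
    omega
  have h1 : d.toNat ≠ 1 := by omega
  have hm2 : 2 ≤ d.toNat.minFac := (Nat.minFac_prime h1).two_le
  have hmsq : d.toNat.minFac * d.toNat.minFac ≤ d.toNat := by
    have := Nat.minFac_sq_le_self (n := d.toNat) (by omega) hnp
    rwa [pow_two] at this
  refine ⟨(d.toNat.minFac : Int), by exact_mod_cast hm2, ?_, ?_⟩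
  · calc ((d.toNat.minFac : Int)) * (d.toNat.minFac : Int)
        = ((d.toNat.minFac * d.toNat.minFac : Nat) : Int) := by push_cast; ring
      _ ≤ (d.toNat : Int) := by exact_mod_cast hmsq
      _ = d := hd0
  · have := Nat.minFac_dvd d.toNat
    have : (d.toNat.minFac : Int) ∣ (d.toNat : Int) := Int.natCast_dvd_natCast.mpr this
    rwa [hd0] at this

-- correctness of A's while loop
lemma pv_loopA_iff (fuel : Nat) (d : Int) (hd : 2 ≤ d) (hodd : d % 2 = 1) :
    ∀ p : Int, 3 ≤ p → p % 2 = 1 → d < p + 2 * fuel → pvNoDiv d p →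
      (pvLoopA fuel d p = true ↔ pvNoDiv d d) := by
  induction fuel with
  | zero =>
      intro p hp _ hfuel hbelow
      simp only [pvLoopA]
      constructor
      · intro _ q hq1 hq2 hq3
        exact hbelow q hq1 (by omega) hq3
      · intro _; trivial
  | succ fuel ih =>
      intro p hp hpodd hfuel hbelow
      simp only [pvLoopA]
      by_cases hle : p * p ≤ d
      · simp only [if_pos hle]
        have hmod : PySem.Int.mod d p = d % p := PySem.Int.mod_eq_emod_of_pos (by omega)
        by_cases hz : PySem.Int.mod d p = 0
        · -- p divides d, and p < d, so d is composite
          have hdvd : p ∣ d := (PySem.Int.mod_eq_zero_iff_dvd d p).mp hz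
          have hplt : p < d := by nlinarith
          simp only [if_pos hz]
          constructor
          · intro h; exact absurd h (by simp)
          · intro h; exact absurd hdvd (h p (by omega) hplt)
        · simp only [if_neg hz]
          apply ih (p + 2) (by omega) (by omega) (by omega)
          intro q hq1 hq2 hq3
          rcases (show q < p ∨ q = p ∨ q = p + 1 by omega) with h | h | h
          · exact hbelow q hq1 h hq3
          · rw [h] at hq3
            exact hz ((PySem.Int.mod_eq_zero_iff_dvd d p).mpr hq3)
          · rw [h] at hq3
            have h2 : (2:Int) ∣ p + 1 := by omega
            have : (2:Int) ∣ d := dvd_trans h2 hq3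
            omega
      · simp only [if_neg hle]
        constructor
        · intro _
          by_contra hc
          obtain ⟨m, hm2, hmsq, hmdvd⟩ := pv_small_div d hd hc
          have hmp : m < p := by nlinarith
          exact hbelow m hm2 hmp hmdvd
        · intro _; trivial

-- B's full-range trial division decides pvNoDiv d d
lemma pv_allB_iff (d : Int) :
    ((PySem.List.pyRange 2 d 1).all (fun k => PySem.Int.mod d k != 0) = true) ↔ pvNoDiv d d := by
  unfold pvNoDiv
  simp only [List.all_eq_true, PySem.List.mem_pyRange_one, bne_iff_ne, ne_eq,
             PySem.Int.mod_eq_zero_iff_dvd]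
  constructor
  · intro h q h1 h2 h3; exact h q ⟨h1, h2⟩ h3
  · intro h q hq; exact h q hq.1 hq.2

-- the two primality checks agree on every d ≥ 2
lemma pv_isPrime_eq (d : Int) (hd : 2 ≤ d) :
    pvIsPrimeA d = (PySem.List.pyRange 2 d 1).all (fun k => PySem.Int.mod d k != 0) := by
  rw [Bool.eq_iff_iff, pv_allB_iff]
  unfold pvIsPrimeA
  have hmod2 : PySem.Int.mod d 2 = d % 2 := PySem.Int.mod_eq_emod_of_pos (by omega)
  by_cases hg : d < 2 ∨ (PySem.Int.mod d 2 = 0 ∧ d ≠ 2)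
  · -- d is even and d ≠ 2: composite, both sides false
    rcases hg with h | ⟨hz, hne⟩
    · omega
    · rw [if_pos (by exact Or.inr ⟨hz, hne⟩)]
      have h2 : (2:Int) ∣ d := by omega
      constructor
      · intro h; exact absurd h (by simp)
      · intro h; exact absurd h2 (h 2 (by omega) (by omega))
  · rw [if_neg hg]
    push_neg at hg
    by_cases h2 : d = 2
    · subst h2
      have : pvLoopA ((2:Int).toNat + 1) 2 3 = true := by decide
      rw [this]
      constructor
      · intro _ q h1 h2 _; omega
      · intro _; rfl
    · have hodd : d % 2 = 1 := by
        rcases em (PySem.Int.mod d 2 = 0) with h | h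
        · exact absurd (hg.2 h) h2
        · rw [hmod2] at h; omega
      apply pv_loopA_iff (d.toNat + 1) d hd hodd 3 (by omega) (by omega) (by omega)
      intro q h1 h2 h3
      have : q = 2 := by omega
      subst this
      omega

lemma pv_main (x y : Int) : gcd_prime_relation x y = gcd_prime_relation_alt x y := by
  unfold gcd_prime_relation gcd_prime_relation_alt
  by_cases h1 : x ≥ y
  · simp [h1]
  · rw [if_neg h1, if_neg h1]
    by_cases h2 : (Int.gcd x y : Int) ≤ 1
    · rw [if_pos h2, if_pos h2]
    · rw [if_neg h2, if_neg h2]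
      exact pv_isPrime_eq _ (by omega)

-- ===== VERDICT (by name: the statement is the Claim_ definition above) =====
theorem gcd_prime_relation_spec : Claim_equal_gcd_prime_relation := by
  intro x y _
  unfold Spec_gcd_prime_relation
  exact pv_main x y
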